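-- pv_equiv track=rewrite | github.com/vnltbb/modellib | modellib/splitter.py | _equalize_min_per_class
-- ===== SOURCE A (Python) =====
-- from typing import Dict, List, Optional, Tuple, Literal, Union
--
-- def _equalize_min_per_class(indices: List[int], labels: List[int]) -> List[int]:
--     """
--     indices 내에서 각 클래스 샘플 수를 '최소 클래스 수'로 동일화.
--     - 재현성을 위해 라운드로빈 방식(섞지 않음)
--     - 반환은 정렬된 인덱스 리스트
--     """
--     from collections import defaultdict
--     buckets = defaultdict(list)
--     for i in indices:
--         buckets[labels[i]].append(i)
--     if len(buckets) <= 1: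
--         return sorted(indices)  # 이진분류 미만이면 그대로
--
--     min_n = min(len(v) for v in buckets.values())
--     out = []
--     for t in range(min_n):
--         for c in sorted(buckets.keys()):
--             out.append(buckets[c][t])
--     return sorted(out)
-- ===== SOURCE B (Python) =====
-- from typing import List
--
-- def _equalize_min_per_class(indices: List[int], labels: List[int]) -> List[int]:
--     from collections import Counter
--     counts = Counter(labels[i] for i in indices)
--     if len(counts) <= 1:
--         return sorted(indices)
--     min_n = min(counts.values())
--     taken = {}
--     out = []
--     for i in indices:
--         c = labels[i]
--         t = taken.get(c, 0)
--         if t < min_n: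
--             taken[c] = t + 1
--             out.append(i)
--     return sorted(out)
-- ===== Notes on version B (the rewrite author's own statement) =====
-- stated objective: simpler
-- what changed: Replaces A's position-indexed list buckets and nested round-robin loops (for t in range(min_n): for c in sorted(keys): buckets[c][t]) by a Counter of class sizes plus one streaming pass over indices that keeps a per-class taken counter and takes the first min_n indices of each class; the final sorted() makes the results identical.
import Mathlib
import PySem

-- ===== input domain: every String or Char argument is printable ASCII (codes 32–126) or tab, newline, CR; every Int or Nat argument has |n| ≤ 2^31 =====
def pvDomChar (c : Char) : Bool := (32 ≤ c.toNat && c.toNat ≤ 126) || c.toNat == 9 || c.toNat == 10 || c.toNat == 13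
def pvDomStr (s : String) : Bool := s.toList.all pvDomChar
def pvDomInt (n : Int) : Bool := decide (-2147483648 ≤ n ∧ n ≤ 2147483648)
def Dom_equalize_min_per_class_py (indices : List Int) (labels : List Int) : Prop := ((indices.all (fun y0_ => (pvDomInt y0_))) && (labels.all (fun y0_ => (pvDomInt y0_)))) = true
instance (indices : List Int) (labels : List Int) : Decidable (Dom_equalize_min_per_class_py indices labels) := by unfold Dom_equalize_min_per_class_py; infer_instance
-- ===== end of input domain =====

-- B replaces A's position-indexed buckets (nested t×class loops reading buckets[c][t]) by a
-- Counter plus a single streaming pass that takes the first min_n indices of each class; simpler, same result.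

-- labels[i] (valid under Pre_, which bounds every i)
def pvLab (labels : List Int) (i : Int) : Int := PySem.List.pyGetD labels i 0

-- ===== PORT A =====
def equalize_min_per_class_py (indices : List Int) (labels : List Int) : List Int :=
  let buckets : PySem.Dict Int (List Int) :=
    indices.foldl (fun d i => d.modify (pvLab labels i) [] (fun v => v ++ [i])) PySem.Dict.empty
  if buckets.size ≤ 1 then
    PySem.List.sorted indices (fun x => x) false
  else
    match PySem.List.min? (buckets.values.map (fun v => (v.length : Int))) (fun x => x) with
    | none => []
    | some min_n =>
      let out : List Int :=
        (PySem.List.pyRange 0 min_n 1).foldl (fun out t =>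
          (PySem.List.sorted buckets.keys (fun x => x) false).foldl (fun out c =>
            out ++ [PySem.List.pyGetD (buckets.getD c []) t 0]) out) []
      PySem.List.sorted out (fun x => x) false

-- ===== PORT B =====
def equalize_min_per_class_py_alt (indices : List Int) (labels : List Int) : List Int :=
  let counts : PySem.Dict Int Int :=
    PySem.Dict.counter (indices.map (fun i => pvLab labels i))
  if counts.size ≤ 1 then
    PySem.List.sorted indices (fun x => x) false
  else
    match PySem.List.min? counts.values (fun x => x) with
    | none => []
    | some min_n =>
      let out : List Int :=
        (indices.foldl (fun (st : PySem.Dict Int Int × List Int) i =>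
            let c := pvLab labels i
            let t := st.1.getD c 0
            if t < min_n then (st.1.insert c (t + 1), st.2 ++ [i]) else st)
          (PySem.Dict.empty, [])).2
      PySem.List.sorted out (fun x => x) false

-- ===== PRECONDITION & SPEC =====
-- Pre_: every i in indices is a valid Python index into labels (otherwise A raises IndexError).
def Pre_equalize_min_per_class_py (indices : List Int) (labels : List Int) : Prop :=
  ∀ i ∈ indices, -(labels.length : Int) ≤ i ∧ i < (labels.length : Int)
instance (indices : List Int) (labels : List Int) : Decidable (Pre_equalize_min_per_class_py indices labels) := by unfold Pre_equalize_min_per_class_py; infer_instance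

def pvWitness_equalize_min_per_class_py : List Int × List Int := ([0, 1, 2], [0, 1, 0])

def Spec_equalize_min_per_class_py (indices : List Int) (labels : List Int) (out : List Int) : Prop := out = equalize_min_per_class_py_alt indices labels
instance (indices : List Int) (labels : List Int) (out : List Int) : Decidable (Spec_equalize_min_per_class_py indices labels out) := by unfold Spec_equalize_min_per_class_py; infer_instance

-- ===== CLAIM (what is proved, stated in full; the proofs are below) =====
def Claim_equal_equalize_min_per_class_py : Prop := ∀ (indices : List Int) (labels : List Int), Dom_equalize_min_per_class_py indices labels → Pre_equalize_min_per_class_py indices labels → Spec_equalize_min_per_class_py indices labels (equalize_min_per_class_py indices labels)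

-- ===== LEMMAS AND PROOFS =====


theorem bucketsA_getD (lab : Int → Int) (indices : List Int) (c : Int) :
    ((indices.foldl (fun d i => d.modify (lab i) [] (fun v => v ++ [i])) PySem.Dict.empty).getD c [])
      = indices.filter (fun i => lab i == c) := by
  have h : indices.foldl (fun d i => d.modify (lab i) [] (fun v => v ++ [i])) PySem.Dict.empty
      = (indices.map (fun i => (lab i, i))).foldl
          (fun d p => d.modify p.1 [] (fun v => v ++ [p.2])) PySem.Dict.empty := by
    rw [List.foldl_map]
  rw [h, PySem.Dict.getD_foldl_modify_append]
  simp [List.filter_map, Function.comp_def]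

theorem bucketsA_keys (lab : Int → Int) (indices : List Int) :
    ((indices.foldl (fun d i => d.modify (lab i) [] (fun v => v ++ [i])) PySem.Dict.empty).keys)
      = PySem.Set.ofList (indices.map lab) := by
  rw [PySem.Dict.keys_foldl_modify_key indices lab [] (fun _ i v => v ++ [i])]
  simp [PySem.Set.update, PySem.Set.ofList_eq_foldl, PySem.Dict.keys, PySem.Dict.empty]

theorem bucketsA_keys_nodup (lab : Int → Int) (indices : List Int) :
    ((indices.foldl (fun d i => d.modify (lab i) [] (fun v => v ++ [i])) PySem.Dict.empty).keys).Nodup := by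
  apply PySem.Dict.nodup_keys_foldl_modify_key
  simp [PySem.Dict.keys, PySem.Dict.empty]

theorem dict_size_eq_keys_length {κ ν : Type} [BEq κ] (d : PySem.Dict κ ν) : d.size = d.keys.length := by
  simp [PySem.Dict.size, PySem.Dict.keys]

theorem sum_map_add_nat {α : Type} (l : List α) (f g : α → Nat) :
    (l.map (fun a => f a + g a)).sum = (l.map f).sum + (l.map g).sum := by
  induction l with
  | nil => simp
  | cons a t ih => simp [ih]; omega

theorem sum_swap_nat {α β : Type} (l1 : List α) (l2 : List β) (f : α → β → Nat) :
    (l1.map (fun a => (l2.map (fun b => f a b)).sum)).sum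
      = (l2.map (fun b => (l1.map (fun a => f a b)).sum)).sum := by
  induction l1 with
  | nil => simp
  | cons a t ih => simp [ih]

theorem sum_single {α : Type} [DecidableEq α] (K : List α) (k : α) (f : α → Nat)
    (hnd : K.Nodup) (h0 : ∀ c ∈ K, c ≠ k → f c = 0) :
    (K.map f).sum = if k ∈ K then f k else 0 := by
  induction K with
  | nil => simp
  | cons a t ih =>
    rcases List.nodup_cons.mp hnd with ⟨ha, ht⟩
    by_cases hk : a = k
    · subst hk
      have : (t.map f).sum = 0 := by
        rw [ih ht (fun c hc hne => h0 c (List.mem_cons_of_mem _ hc) hne)]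
        simp [ha]
      simp [this]
    · have := ih ht (fun c hc hne => h0 c (List.mem_cons_of_mem _ hc) hne)
      simp [h0 a (List.mem_cons_self) hk, this, List.mem_cons, Ne.symm hk]

theorem count_take_sum (l : List Int) (n : Nat) (x : Int) (h : n ≤ l.length) :
    ((List.range n).map (fun t => if l.getD t 0 = x then 1 else 0)).sum = (l.take n).count x := by
  induction n with
  | zero => simp
  | succ n ih =>
    rw [List.range_succ, List.take_add_one]
    simp only [List.map_append, List.sum_append, List.count_append]
    rw [ih (by omega)]
    have hn : n < l.length := by omega
    simp [List.getD_eq_getElem?_getD, List.getElem?_eq_getElem hn, List.count_cons, List.count_nil]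

theorem count_split (lab : Int → Int) (x : Int) (K : List Int) (hnd : K.Nodup) :
    ∀ (l : List Int), (∀ y ∈ l, lab y ∈ K) →
    (K.map (fun c => (l.filter (fun y => lab y == c)).count x)).sum = l.count x := by
  intro l
  induction l with
  | nil => simp
  | cons y t ih =>
    intro hall
    have hmem : lab y ∈ K := hall y List.mem_cons_self
    have step : ∀ c : Int, ((y :: t).filter (fun z => lab z == c)).count x
        = (if c = lab y ∧ x = y then 1 else 0) + (t.filter (fun z => lab z == c)).count x := by
      intro c
      by_cases hc : lab y = c
      · simp [hc, List.count_cons]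
        by_cases hx : x = y <;> simp [hx, hc.symm] <;> omega
      · simp [hc]
        intro h; exact absurd h.symm hc
    have : (K.map (fun c => ((y :: t).filter (fun z => lab z == c)).count x)).sum
        = (K.map (fun c => (if c = lab y ∧ x = y then 1 else 0))).sum
          + (K.map (fun c => (t.filter (fun z => lab z == c)).count x)).sum := by
      rw [← sum_map_add_nat]
      exact congrArg List.sum (List.map_congr_left (fun c _ => step c))
    rw [this, ih (fun z hz => hall z (List.mem_cons_of_mem _ hz))]
    have hones : (K.map (fun c => (if c = lab y ∧ x = y then 1 else 0))).sum
        = if x = y then 1 else 0 := by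
      rw [sum_single K (lab y) _ hnd (by intro c hc hne; simp [hne])]
      simp [hmem]
    rw [hones, List.count_cons]
    by_cases hx : x = y <;> simp [hx] <;> omega


theorem stream_filter (lab : Int → Int) (m c : Int) :
    ∀ (l : List Int) (d : PySem.Dict Int Int) (out : List Int),
    ((l.foldl (fun (st : PySem.Dict Int Int × List Int) i =>
        let cc := lab i
        let t := st.1.getD cc 0
        if t < m then (st.1.insert cc (t + 1), st.2 ++ [i]) else st) (d, out)).2).filter (fun i => lab i == c)
      = out.filter (fun i => lab i == c) ++ (l.filter (fun i => lab i == c)).take (m - d.getD c 0).toNat := by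
  intro l
  induction l with
  | nil => intro d out; simp
  | cons i t ih =>
    intro d out
    simp only [List.foldl_cons]
    by_cases hlt : d.getD (lab i) 0 < m
    · simp only [hlt, if_pos]
      rw [ih]
      by_cases hc : lab i = c
      · subst hc
        rw [PySem.Dict.getD_insert_self]
        have h1 : (m - d.getD (lab i) 0).toNat = (m - (d.getD (lab i) 0 + 1)).toNat + 1 := by omega
        simp only [List.filter_cons, List.filter_append, beq_self_eq_true, if_pos, h1,
          List.take_succ_cons]
        simp
      · rw [PySem.Dict.getD_insert_of_ne _ _ _ (fun h => hc h.symm)]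
        have : (lab i == c) = false := by simp [hc]
        simp [List.filter_append, this]
    · simp only [hlt, if_neg, not_false_iff]
      rw [ih]
      by_cases hc : lab i = c
      · subst hc
        have h0 : (m - d.getD (lab i) 0).toNat = 0 := by omega
        simp [h0]
      · have : (lab i == c) = false := by simp [hc]
        simp [this]

theorem stream_mem (lab : Int → Int) (m : Int) :
    ∀ (l : List Int) (d : PySem.Dict Int Int) (out : List Int) (y : Int),
    y ∈ (l.foldl (fun (st : PySem.Dict Int Int × List Int) i =>
        let cc := lab i
        let t := st.1.getD cc 0
        if t < m then (st.1.insert cc (t + 1), st.2 ++ [i]) else st) (d, out)).2 → y ∈ out ∨ y ∈ l := by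
  intro l
  induction l with
  | nil => intro d out y h; exact Or.inl h
  | cons i t ih =>
    intro d out y h
    simp only [List.foldl_cons] at h
    by_cases hlt : d.getD (lab i) 0 < m
    · simp only [hlt, if_pos] at h
      rcases ih _ _ y h with h1 | h1
      · rcases List.mem_append.mp h1 with h2 | h2
        · exact Or.inl h2
        · simp at h2; simp [h2]
      · simp [h1]
    · simp only [hlt, if_neg, not_false_iff] at h
      rcases ih _ _ y h with h1 | h1
      · exact Or.inl h1
      · simp [h1]


theorem count_map_eq_sum {α : Type} (K : List α) (g : α → Int) (x : Int) :
    (K.map g).count x = (K.map (fun c => if g c = x then 1 else 0)).sum := by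
  induction K with
  | nil => simp
  | cons a t ih =>
    simp only [List.map_cons, List.count_cons, List.sum_cons, ih]
    by_cases h : g a = x
    · simp [h]
      omega
    · simp [h]

-- ===== main proof =====
theorem equalize_min_per_class_py_spec : Claim_equal_equalize_min_per_class_py := by
  intro indices labels _hdom _hpre
  unfold Spec_equalize_min_per_class_py equalize_min_per_class_py equalize_min_per_class_py_alt
  set lab : Int → Int := fun i => pvLab labels i with hlab
  set ls : List Int := indices.map lab with hls
  set kS : List Int := PySem.Set.ofList ls with hkS
  set bkt : Int → List Int := fun c => indices.filter (fun i => lab i == c) with hbkt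
  set buckets : PySem.Dict Int (List Int) :=
    indices.foldl (fun d i => d.modify (pvLab labels i) [] (fun v => v ++ [i])) PySem.Dict.empty with hbuckets
  set counts : PySem.Dict Int Int := PySem.Dict.counter (indices.map (fun i => pvLab labels i)) with hcounts
  have hkeysA : buckets.keys = kS := bucketsA_keys lab indices
  have hcounts' : counts = PySem.Dict.counter ls := rfl
  have hkeysB : counts.keys = kS := by rw [hcounts', PySem.Dict.keys_counter]
  have hnodA : buckets.keys.Nodup := bucketsA_keys_nodup lab indices
  have hnodkS : kS.Nodup := hkeysA ▸ hnodA
  have hlen : ∀ c : Int, (bkt c).length = ls.count c := by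
    intro c
    rw [hbkt, hls]
    simp only [List.count_eq_countP, List.countP_map, ← List.countP_eq_length_filter]
    rfl
  have hgetD : ∀ c : Int, buckets.getD c [] = bkt c := fun c => bucketsA_getD lab indices c
  have hsize : buckets.size = counts.size := by
    rw [dict_size_eq_keys_length, dict_size_eq_keys_length, hkeysA, hkeysB]
  have hvals : buckets.values.map (fun v => (v.length : Int)) = counts.values := by
    rw [PySem.Dict.values_eq_map_keys buckets hnodA [], hkeysA]
    have : counts.values = counts.items.map (·.2) := rfl
    rw [this, hcounts', PySem.Dict.items_counter]
    simp only [List.map_map]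
    refine List.map_congr_left (fun c _ => ?_)
    simp only [Function.comp_def, hgetD, hlen]
  dsimp only
  rw [hsize, hvals]
  by_cases hsmall : counts.size ≤ 1
  · simp [hsmall]
  · simp only [hsmall, if_neg, not_false_iff]
    cases hmin : PySem.List.min? counts.values (fun x => x) with
    | none => rfl
    | some m =>
      -- m is one of the (Nat-cast) class counts, and it is minimal
      have hmV : m ∈ counts.values := PySem.List.min?_mem hmin
      have hmval : ∃ k, m = ((ls.count k : Nat) : Int) := by
        have : counts.values = kS.map (fun k => ((ls.count k : Nat) : Int)) := by
          have : counts.values = counts.items.map (·.2) := rfl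
          rw [this, hcounts', PySem.Dict.items_counter]; simp [List.map_map, Function.comp_def]; rfl
        rw [this] at hmV
        rcases List.mem_map.mp hmV with ⟨k, _, hk⟩
        exact ⟨k, hk.symm⟩
      rcases hmval with ⟨k0, hk0⟩
      have hm0 : 0 ≤ m := by rw [hk0]; positivity
      have hmN : m = ((m.toNat : Nat) : Int) := by omega
      set mN : Nat := m.toNat with hmNdef
      have hminmin : ∀ c ∈ kS, mN ≤ ls.count c := by
        intro c hc
        have hcv : ((ls.count c : Nat) : Int) ∈ counts.values := by
          have : counts.values = kS.map (fun k => ((ls.count k : Nat) : Int)) := by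
            have : counts.values = counts.items.map (·.2) := rfl
            rw [this, hcounts', PySem.Dict.items_counter]; simp [List.map_map, Function.comp_def]; rfl
          rw [this]; exact List.mem_map.mpr ⟨c, hc, rfl⟩
        have := PySem.List.min?_isMin hmin _ hcv
        omega
      -- A's output list
      set sk : List Int := PySem.List.sorted kS (fun x => x) false with hsk
      have hskkS : ∀ c, c ∈ sk ↔ c ∈ kS := fun c => PySem.List.mem_sorted kS _ false c
      have hsknod : sk.Nodup := ((PySem.List.sorted_perm kS (fun x => x) false).nodup_iff).mpr hnodkS
      have hA : ((PySem.List.pyRange 0 m 1).foldl (fun out t =>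
            (PySem.List.sorted buckets.keys (fun x => x) false).foldl (fun out c =>
              out ++ [PySem.List.pyGetD (buckets.getD c []) t 0]) out) [])
          = (List.range mN).flatMap (fun tN => sk.map (fun c => (bkt c).getD tN 0)) := by
        rw [hkeysA, ← hsk]
        have hrow : ∀ (t : Int) (acc : List Int),
            sk.foldl (fun out c => out ++ [PySem.List.pyGetD (buckets.getD c []) t 0]) acc
              = acc ++ sk.map (fun c => PySem.List.pyGetD (bkt c) t 0) := by
          intro t acc
          simp only [hgetD]
          exact PySem.List.foldl_append_singleton_eq_map _ sk acc
        calc (PySem.List.pyRange 0 m 1).foldl (fun out t =>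
                sk.foldl (fun out c => out ++ [PySem.List.pyGetD (buckets.getD c []) t 0]) out) []
            = (PySem.List.pyRange 0 m 1).foldl (fun out t =>
                out ++ sk.map (fun c => PySem.List.pyGetD (bkt c) t 0)) [] := by
              exact List.foldl_ext _ _ [] (fun acc t _ => hrow t acc)
          _ = (PySem.List.pyRange 0 m 1).flatMap (fun t => sk.map (fun c => PySem.List.pyGetD (bkt c) t 0)) := by
              exact PySem.List.foldl_append_eq_flatMap _ _ []
          _ = (List.range mN).flatMap (fun tN => sk.map (fun c => (bkt c).getD tN 0)) := by
              rw [hmN, PySem.List.pyRange_zero_natCast, List.flatMap_map]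
              simp only [PySem.List.pyGetD_natCast]
      dsimp only
      set Bout : List Int := (indices.foldl (fun (st : PySem.Dict Int Int × List Int) i =>
          if st.1.getD (pvLab labels i) 0 < m then
            (st.1.insert (pvLab labels i) (st.1.getD (pvLab labels i) 0 + 1), st.2 ++ [i])
          else st) (PySem.Dict.empty, [])).2 with hBout
      rw [hA]
      -- per-class characterisation of B's streaming output
      have hstream : ∀ c : Int, Bout.filter (fun i => lab i == c) = (bkt c).take mN := by
        intro c
        have h := stream_filter lab m c indices PySem.Dict.empty []
        have hempty : (PySem.Dict.empty (κ := Int) (ν := Int)).getD c 0 = 0 := rfl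
        rw [hempty, Int.sub_zero] at h
        simpa using h
      have hmemB : ∀ y ∈ Bout, lab y ∈ sk := by
        intro y hy
        rcases stream_mem lab m indices PySem.Dict.empty [] y hy with h | h
        · simp at h
        · exact (hskkS _).mpr ((PySem.Set.mem_ofList ls (lab y)).mpr (List.mem_map_of_mem h))
      -- both sides have the same multiset: count every x
      apply PySem.List.sorted_eq_sorted_of_perm _ _ _ (fun a b hab => hab)
      apply List.perm_iff_count.mpr
      intro x
      have hAcount : ((List.range mN).flatMap (fun tN => sk.map (fun c => (bkt c).getD tN 0))).count x
          = (sk.map (fun c => ((bkt c).take mN).count x)).sum := by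
        rw [List.count_flatMap]
        have hrow : ∀ tN ∈ List.range mN, (List.count x ∘ fun tN => sk.map (fun c => (bkt c).getD tN 0)) tN
            = (sk.map (fun c => if (bkt c).getD tN 0 = x then 1 else 0)).sum := by
          intro tN _
          simp only [Function.comp_apply]
          exact count_map_eq_sum sk _ x
        rw [List.map_congr_left hrow, sum_swap_nat]
        refine congrArg List.sum (List.map_congr_left (fun c hc => ?_))
        exact count_take_sum (bkt c) mN x (by rw [hlen]; exact hminmin c ((hskkS c).mp hc))
      rw [hAcount, ← count_split lab x sk hsknod Bout hmemB]
      exact congrArg List.sum (List.map_congr_left (fun c _ => by rw [hstream c]))
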